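-- pv_equiv track=rewrite | github.com/olsenw/LeetCodeExercises | Python3/largest_magic_square.py | largestMagicSquare_fails
-- ===== SOURCE A (Python) =====
-- from typing import List, Dict, Set, Optional
--
-- def largestMagicSquare_fails(grid: List[List[int]]) -> int:
--     m,n = len(grid), len(grid[0])
--     answer = 1
--     for i in range(m):
--         for j in range(n):
--             for d in range(1,min(m-i,n-j)):
--                 rows = [0] * d
--                 for x in range(i,i+d):
--                     for y in range(j,j+d):
--                         rows[x-i] += grid[x][y]
--                 if not all(r == rows[0] for r in rows):
--                     break
--                 cols = [0] * d
--                 for y in range(j,j+d):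
--                     for x in range(i,i+d):
--                         cols[y-j] += grid[x][y]
--                 if not all(c == rows[0] for c in cols):
--                     break
--                 diag = 0
--                 for x in range(d):
--                     diag += grid[i+x][j+x]
--                 if diag != rows[0]:
--                     break
--                 diag = 0
--                 for x in range(d):
--                     diag += grid[i+d-x][j+x]
--                 if diag != rows[0]:
--                     break
--                 answer = max(answer, d)
--     return answer
-- ===== SOURCE B (Python) =====
-- from typing import List
--
-- def largestMagicSquare_fails(grid: List[List[int]]) -> int:
--     m, n = len(grid), len(grid[0])
--     answer = 1
--     for i in range(m):
--         for j in range(n):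
--             rs = []
--             cs = []
--             diag = 0
--             for d in range(1, min(m - i, n - j)):
--                 e = d - 1
--                 row = grid[i + e]
--                 rs = [r + grid[x][j + e] for x, r in zip(range(i, i + e), rs)]
--                 newr = 0
--                 for y in range(j, j + d):
--                     newr += row[y]
--                 rs.append(newr)
--                 cs = [c + row[y] for y, c in zip(range(j, j + e), cs)]
--                 newc = 0
--                 for x in range(i, i + d):
--                     newc += grid[x][j + e]
--                 cs.append(newc)
--                 diag += row[j + e]
--                 s = rs[0]
--                 if not all(r == s for r in rs):
--                     break
--                 if not all(c == s for c in cs):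
--                     break
--                 if diag != s:
--                     break
--                 adiag = 0
--                 for x in range(d):
--                     adiag += grid[i + d - x][j + x]
--                 if adiag != s:
--                     break
--                 answer = max(answer, d)
--     return answer
-- ===== Notes on version B (the rewrite author's own statement) =====
-- stated objective: faster
-- what changed: B grows each candidate square incrementally, carrying the window's row sums, column sums and main-diagonal sum from size d-1 to size d (O(d) update per step via zip/append), instead of A's recomputation of every row and column sum from scratch with nested loops at every size (O(d^2) per step).
import Mathlib
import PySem

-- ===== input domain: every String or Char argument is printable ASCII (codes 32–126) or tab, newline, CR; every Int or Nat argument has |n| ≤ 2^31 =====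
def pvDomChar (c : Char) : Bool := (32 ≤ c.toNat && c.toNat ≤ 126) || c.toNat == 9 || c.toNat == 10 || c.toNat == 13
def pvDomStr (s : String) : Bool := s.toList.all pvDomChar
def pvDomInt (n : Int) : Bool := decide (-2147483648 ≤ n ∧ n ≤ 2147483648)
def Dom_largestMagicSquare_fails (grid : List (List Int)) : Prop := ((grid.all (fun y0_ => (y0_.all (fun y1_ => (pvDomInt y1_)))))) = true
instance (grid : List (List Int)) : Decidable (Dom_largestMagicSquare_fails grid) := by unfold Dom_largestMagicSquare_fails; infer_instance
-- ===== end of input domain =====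

-- B reproduces A's exact behaviour but grows each candidate square incrementally,
-- carrying the window's row/column/diagonal sums from size d-1 to size d instead of
-- recomputing every sum with nested loops at every size; objective: faster.

-- ===== PORT A =====
-- grid[x][y]; both programs only ever index with nonnegative x, y
def pvCell (grid : List (List Int)) (x y : Int) : Int :=
  PySem.List.pyGetD (PySem.List.pyGetD grid x []) y 0

-- rows = [0]*d; for x in range(i,i+d): for y in range(j,j+d): rows[x-i] += grid[x][y]
def pvA_rows (grid : List (List Int)) (i j d : Int) : List Int :=
  (PySem.List.pyRange i (i + d) 1).foldl (fun rows x =>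
    (PySem.List.pyRange j (j + d) 1).foldl (fun rows y =>
      PySem.List.pySetD rows (x - i) (PySem.List.pyGetD rows (x - i) 0 + pvCell grid x y)) rows)
    (List.replicate d.toNat 0)

-- cols = [0]*d; for y in range(j,j+d): for x in range(i,i+d): cols[y-j] += grid[x][y]
def pvA_cols (grid : List (List Int)) (i j d : Int) : List Int :=
  (PySem.List.pyRange j (j + d) 1).foldl (fun cols y =>
    (PySem.List.pyRange i (i + d) 1).foldl (fun cols x =>
      PySem.List.pySetD cols (y - j) (PySem.List.pyGetD cols (y - j) 0 + pvCell grid x y)) cols)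
    (List.replicate d.toNat 0)

-- the `for d in range(1, min(m-i, n-j))` loop; `break` returns the current answer
def pvA_dloop (grid : List (List Int)) (i j : Int) : List Int → Int → Int
  | [], answer => answer
  | d :: rest, answer =>
    let rows := pvA_rows grid i j d
    if ¬ (rows.all fun r => r == PySem.List.pyGetD rows 0 0) then answer
    else
      let cols := pvA_cols grid i j d
      if ¬ (cols.all fun c => c == PySem.List.pyGetD rows 0 0) then answer
      else
        let diag := (PySem.List.pyRange 0 d 1).foldl (fun acc x => acc + pvCell grid (i + x) (j + x)) 0
        if diag ≠ PySem.List.pyGetD rows 0 0 then answer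
        else
          let adiag := (PySem.List.pyRange 0 d 1).foldl (fun acc x => acc + pvCell grid (i + d - x) (j + x)) 0
          if adiag ≠ PySem.List.pyGetD rows 0 0 then answer
          else pvA_dloop grid i j rest (max answer d)

def largestMagicSquare_fails (grid : List (List Int)) : Int :=
  let m : Int := grid.length
  let n : Int := (PySem.List.pyGetD grid 0 []).length
  (PySem.List.pyRange 0 m 1).foldl (fun answer i =>
    (PySem.List.pyRange 0 n 1).foldl (fun answer j =>
      pvA_dloop grid i j (PySem.List.pyRange 1 (min (m - i) (n - j)) 1) answer) answer) 1

-- ===== PORT B =====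
-- the same d-loop, but carrying (rs, cs, diag): the window's row sums, column sums
-- and main-diagonal sum at the previous size, updated by zip/append per step
def pvB_dloop (grid : List (List Int)) (i j : Int) : List Int → List Int × List Int × Int → Int → Int
  | [], _, answer => answer
  | d :: rest, (rs, cs, diag), answer =>
    let e := d - 1
    let row := PySem.List.pyGetD grid (i + e) []
    let rs := ((PySem.List.pyRange i (i + e) 1).zip rs).map fun p => p.2 + pvCell grid p.1 (j + e)
    let newr := (PySem.List.pyRange j (j + d) 1).foldl (fun acc y => acc + PySem.List.pyGetD row y 0) 0
    let rs := rs ++ [newr]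
    let cs := ((PySem.List.pyRange j (j + e) 1).zip cs).map fun p => p.2 + PySem.List.pyGetD row p.1 0
    let newc := (PySem.List.pyRange i (i + d) 1).foldl (fun acc x => acc + pvCell grid x (j + e)) 0
    let cs := cs ++ [newc]
    let diag := diag + PySem.List.pyGetD row (j + e) 0
    let s := PySem.List.pyGetD rs 0 0
    if ¬ (rs.all fun r => r == s) then answer
    else if ¬ (cs.all fun c => c == s) then answer
    else if diag ≠ s then answer
    else
      let adiag := (PySem.List.pyRange 0 d 1).foldl (fun acc x => acc + pvCell grid (i + d - x) (j + x)) 0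
      if adiag ≠ s then answer
      else pvB_dloop grid i j rest (rs, cs, diag) (max answer d)

def largestMagicSquare_fails_alt (grid : List (List Int)) : Int :=
  let m : Int := grid.length
  let n : Int := (PySem.List.pyGetD grid 0 []).length
  (PySem.List.pyRange 0 m 1).foldl (fun answer i =>
    (PySem.List.pyRange 0 n 1).foldl (fun answer j =>
      pvB_dloop grid i j (PySem.List.pyRange 1 (min (m - i) (n - j)) 1) ([], [], 0) answer) answer) 1

-- ===== PRECONDITION & SPEC =====
-- Exactly the inputs on which Python A returns: A raises IndexError on the empty grid
-- (grid[0]); when m ≥ 2 and n ≥ 2, for every j ≤ n-2 the d = 1 step at i = m-2 reaches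
-- grid[m-1][j] unconditionally (and at (r, j) it reads grid[r][j] first), so A reads a
-- cell of every row at every column index up to n-2 and raises iff some row is shorter
-- than n-1; with m ≤ 1 or n ≤ 1 the d-loop body never runs.
def Pre_largestMagicSquare_fails (grid : List (List Int)) : Prop :=
  grid ≠ [] ∧
    (grid.length ≤ 1 ∨ (grid.headD []).length ≤ 1 ∨
      ∀ row ∈ grid, (grid.headD []).length - 1 ≤ row.length)
instance (grid : List (List Int)) : Decidable (Pre_largestMagicSquare_fails grid) := by
  unfold Pre_largestMagicSquare_fails; infer_instance

def pvWitness_largestMagicSquare_fails : List (List Int) := [[1, 1], [1, 1]]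

def Spec_largestMagicSquare_fails (grid : List (List Int)) (out : Int) : Prop := out = largestMagicSquare_fails_alt grid
instance (grid : List (List Int)) (out : Int) : Decidable (Spec_largestMagicSquare_fails grid out) := by unfold Spec_largestMagicSquare_fails; infer_instance

-- ===== CLAIM (what is proved, stated in full; the proofs are below) =====
def Claim_equal_largestMagicSquare_fails : Prop := ∀ (grid : List (List Int)), Dom_largestMagicSquare_fails grid → Pre_largestMagicSquare_fails grid → Spec_largestMagicSquare_fails grid (largestMagicSquare_fails grid)

-- ===== LEMMAS AND PROOFS =====

-- the sums both programs compute, and the invariant B's state maintains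
def pvRowSum (grid : List (List Int)) (x a b : Int) : Int :=
  ((PySem.List.pyRange a b 1).map (fun y => pvCell grid x y)).sum
def pvColSum (grid : List (List Int)) (y a b : Int) : Int :=
  ((PySem.List.pyRange a b 1).map (fun x => pvCell grid x y)).sum
def pvDiagSum (grid : List (List Int)) (i j d : Int) : Int :=
  ((PySem.List.pyRange 0 d 1).map (fun x => pvCell grid (i + x) (j + x))).sum
def pvRS (grid : List (List Int)) (i j t : Int) : List Int :=
  (PySem.List.pyRange i (i + t) 1).map (fun x => pvRowSum grid x j (j + t))
def pvCS (grid : List (List Int)) (i j t : Int) : List Int :=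
  (PySem.List.pyRange j (j + t) 1).map (fun y => pvColSum grid y i (i + t))

-- repeated `l[k] += f y` over ys adds the sum of f over ys into slot k
lemma pv_fold_addAt (f : Int → Int) :
    ∀ (ys : List Int) (l : List Int) (k : Nat), k < l.length →
      ys.foldl (fun r y => r.set k (r.getD k 0 + f y)) l
        = l.set k (l.getD k 0 + (ys.map f).sum) := by
  intro ys
  induction ys with
  | nil =>
    intro l k hk
    simp only [List.foldl_nil, List.map_nil, List.sum_nil, add_zero]
    rw [List.getD_eq_getElem l 0 hk, List.set_getElem_self]
  | cons y ys ih =>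
    intro l k hk
    have hlen : k < (l.set k (l.getD k 0 + f y)).length := by simpa using hk
    simp only [List.foldl_cons]
    rw [ih _ k hlen]
    rw [List.set_set]
    rw [List.getD_eq_getElem _ 0 hlen, List.getElem_set_self]
    congr 1
    simp only [List.map_cons, List.sum_cons]
    ring

-- A's build pattern fills the preallocated zero list slot by slot with the inner sums
lemma pv_build (g : Int → Int → Int) (inner : List Int) (a : Int) (dn : Nat) :
    ∀ (k : Nat), k ≤ dn →
      (PySem.List.pyRange a (a + (k : Int)) 1).foldl
        (fun rows u => inner.foldl
          (fun rows v => PySem.List.pySetD rows (u - a) (PySem.List.pyGetD rows (u - a) 0 + g u v)) rows)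
        (List.replicate dn 0)
      = (PySem.List.pyRange a (a + (k : Int)) 1).map (fun u => (inner.map (g u)).sum)
          ++ List.replicate (dn - k) 0 := by
  intro k
  induction k with
  | zero =>
    intro _
    simp
  | succ k ih =>
    intro hk
    have hcast : a + ((k + 1 : Nat) : Int) = (a + (k : Int)) + 1 := by push_cast; ring
    rw [hcast, PySem.List.pyRange_one_succ_right (by omega : a ≤ a + (k : Int))]
    rw [List.foldl_append, ih (by omega)]
    have hsub : (a + (k : Int)) - a = (k : Int) := by ring
    have hbody : ∀ (rows : List Int) (v : Int),
        PySem.List.pySetD rows ((a + (k : Int)) - a)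
            (PySem.List.pyGetD rows ((a + (k : Int)) - a) 0 + g (a + (k : Int)) v)
          = rows.set k (rows.getD k 0 + g (a + (k : Int)) v) := by
      intro rows v
      rw [hsub, PySem.List.pySetD_of_nonneg rows _ (by omega),
          PySem.List.pyGetD_of_nonneg rows 0 (by omega)]
      simp
    simp only [List.foldl_cons, List.foldl_nil, hbody]
    set L := (PySem.List.pyRange a (a + (k:Int)) 1).map (fun u => (inner.map (g u)).sum) with hL
    have hLlen : L.length = k := by
      rw [hL]; simp [PySem.List.length_pyRange_one]
    have hlen : k < (L ++ List.replicate (dn - k) 0).length := by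
      simp [hLlen]; omega
    rw [pv_fold_addAt _ inner _ k hlen]
    have hrep : dn - k = (dn - (k+1)) + 1 := by omega
    have hgetd : (L ++ List.replicate (dn - k) 0).getD k 0 = 0 := by
      rw [List.getD_eq_getElem _ 0 hlen, List.getElem_append_right (by omega)]
      simp [hLlen]
    have hset : (L ++ List.replicate (dn - k) 0).set k (0 + (inner.map (g (a + (k:Int)))).sum)
        = (L ++ [(inner.map (g (a + (k:Int)))).sum]) ++ List.replicate (dn - (k+1)) 0 := by
      rw [hrep, List.replicate_succ, List.set_append_right _ _ (by omega)]
      simp [hLlen]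
    rw [hgetd, hset]
    simp [hL]

lemma pvA_rows_eq (grid : List (List Int)) (i j d : Int) (hd : 0 ≤ d) :
    pvA_rows grid i j d = pvRS grid i j d := by
  unfold pvA_rows pvRS pvRowSum
  rw [show i + d = i + ((d.toNat : Nat) : Int) by omega]
  have h := pv_build (fun u v => pvCell grid u v) (PySem.List.pyRange j (j + d) 1) i d.toNat d.toNat le_rfl
  simpa using h

lemma pvA_cols_eq (grid : List (List Int)) (i j d : Int) (hd : 0 ≤ d) :
    pvA_cols grid i j d = pvCS grid i j d := by
  unfold pvA_cols pvCS pvColSum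
  rw [show j + d = j + ((d.toNat : Nat) : Int) by omega]
  have h := pv_build (fun u v => pvCell grid v u) (PySem.List.pyRange i (i + d) 1) j d.toNat d.toNat le_rfl
  simpa using h

-- mapping over a list zipped with its own image under h
lemma pv_zip_map {α : Type} (h g : α → Int) :
    ∀ (l : List α), ((l.zip (l.map h)).map fun p => p.2 + g p.1) = l.map (fun u => h u + g u) := by
  intro l; induction l with
  | nil => rfl
  | cons x xs ih => simp [ih]

lemma pvRowSum_succ (grid : List (List Int)) (x j e : Int) (he : 0 ≤ e) :
    pvRowSum grid x j (j + e + 1) = pvRowSum grid x j (j + e) + pvCell grid x (j + e) := by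
  unfold pvRowSum
  rw [PySem.List.pyRange_one_succ_right (by omega : j ≤ j + e)]
  simp

lemma pvColSum_succ (grid : List (List Int)) (y i e : Int) (he : 0 ≤ e) :
    pvColSum grid y i (i + e + 1) = pvColSum grid y i (i + e) + pvCell grid (i + e) y := by
  unfold pvColSum
  rw [PySem.List.pyRange_one_succ_right (by omega : i ≤ i + e)]
  simp

lemma pvDiagSum_succ (grid : List (List Int)) (i j e : Int) (he : 0 ≤ e) :
    pvDiagSum grid i j (e + 1) = pvDiagSum grid i j e + pvCell grid (i + e) (j + e) := by
  unfold pvDiagSum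
  rw [PySem.List.pyRange_one_succ_right (by omega : (0 : Int) ≤ e)]
  simp

lemma pvRS_zero (grid : List (List Int)) (i j : Int) : pvRS grid i j 0 = [] := by
  simp [pvRS]
lemma pvCS_zero (grid : List (List Int)) (i j : Int) : pvCS grid i j 0 = [] := by
  simp [pvCS]
lemma pvDiagSum_zero (grid : List (List Int)) (i j : Int) : pvDiagSum grid i j 0 = 0 := by
  simp [pvDiagSum]

-- B's updated row-sum list at size d equals the invariant at size d
lemma pvRS_step (grid : List (List Int)) (i j d : Int) (hd : 1 ≤ d) :
    (((PySem.List.pyRange i (i + (d - 1)) 1).zip (pvRS grid i j (d - 1))).map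
        fun p => p.2 + pvCell grid p.1 (j + (d - 1)))
      ++ [(PySem.List.pyRange j (j + d) 1).foldl
            (fun acc y => acc + PySem.List.pyGetD (PySem.List.pyGetD grid (i + (d - 1)) []) y 0) 0]
    = pvRS grid i j d := by
  have h1 : ((PySem.List.pyRange i (i + (d - 1)) 1).zip (pvRS grid i j (d - 1))).map
        (fun p => p.2 + pvCell grid p.1 (j + (d - 1)))
      = (PySem.List.pyRange i (i + (d - 1)) 1).map (fun x => pvRowSum grid x j (j + d)) := by
    rw [pvRS, pv_zip_map (fun x => pvRowSum grid x j (j + (d - 1)))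
      (fun u => pvCell grid u (j + (d - 1)))]
    refine List.map_congr_left (fun x _ => ?_)
    have := pvRowSum_succ grid x j (d - 1) (by omega)
    rw [show j + (d - 1) + 1 = j + d by ring] at this
    rw [this]
  have h2 : (PySem.List.pyRange j (j + d) 1).foldl
        (fun acc y => acc + PySem.List.pyGetD (PySem.List.pyGetD grid (i + (d - 1)) []) y 0) 0
      = pvRowSum grid (i + (d - 1)) j (j + d) := by
    rw [PySem.List.foldl_add]
    simp [pvRowSum, pvCell]
  rw [h1, h2, pvRS]
  rw [show i + d = (i + (d - 1)) + 1 by ring,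
      PySem.List.pyRange_one_succ_right (by omega : i ≤ i + (d - 1))]
  simp

-- B's updated column-sum list at size d equals the invariant at size d
lemma pvCS_step (grid : List (List Int)) (i j d : Int) (hd : 1 ≤ d) :
    (((PySem.List.pyRange j (j + (d - 1)) 1).zip (pvCS grid i j (d - 1))).map
        fun p => p.2 + PySem.List.pyGetD (PySem.List.pyGetD grid (i + (d - 1)) []) p.1 0)
      ++ [(PySem.List.pyRange i (i + d) 1).foldl
            (fun acc x => acc + pvCell grid x (j + (d - 1))) 0]
    = pvCS grid i j d := by
  have h1 : ((PySem.List.pyRange j (j + (d - 1)) 1).zip (pvCS grid i j (d - 1))).map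
        (fun p => p.2 + PySem.List.pyGetD (PySem.List.pyGetD grid (i + (d - 1)) []) p.1 0)
      = (PySem.List.pyRange j (j + (d - 1)) 1).map (fun y => pvColSum grid y i (i + d)) := by
    rw [pvCS, pv_zip_map (fun y => pvColSum grid y i (i + (d - 1)))
      (fun u => PySem.List.pyGetD (PySem.List.pyGetD grid (i + (d - 1)) []) u 0)]
    refine List.map_congr_left (fun y _ => ?_)
    have := pvColSum_succ grid y i (d - 1) (by omega)
    rw [show i + (d - 1) + 1 = i + d by ring] at this
    rw [this]; rfl
  have h2 : (PySem.List.pyRange i (i + d) 1).foldl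
        (fun acc x => acc + pvCell grid x (j + (d - 1))) 0
      = pvColSum grid (j + (d - 1)) i (i + d) := by
    rw [PySem.List.foldl_add]
    simp [pvColSum]
  rw [h1, h2, pvCS]
  rw [show j + d = (j + (d - 1)) + 1 by ring,
      PySem.List.pyRange_one_succ_right (by omega : j ≤ j + (d - 1))]
  simp

-- core: the two d-loops agree when B's state carries the invariant at size d0 - 1
lemma pv_dloop_eq (grid : List (List Int)) (i j : Int) :
    ∀ (k : Nat) (d0 ans : Int), 1 ≤ d0 →
      pvA_dloop grid i j (PySem.List.pyRange d0 (d0 + (k : Int)) 1) ans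
        = pvB_dloop grid i j (PySem.List.pyRange d0 (d0 + (k : Int)) 1)
            (pvRS grid i j (d0 - 1), pvCS grid i j (d0 - 1), pvDiagSum grid i j (d0 - 1)) ans := by
  intro k
  induction k with
  | zero =>
    intro d0 ans _
    have h0 : PySem.List.pyRange d0 (d0 + ((0:Nat):Int)) 1 = [] :=
      PySem.List.pyRange_one_eq_nil (by push_cast; omega)
    rw [h0]
    rfl
  | succ k ih =>
    intro d0 ans hd0
    rw [show d0 + ((k + 1 : Nat) : Int) = (d0 + 1) + (k : Int) by push_cast; ring]
    rw [PySem.List.pyRange_one_cons (by omega : d0 < (d0 + 1) + (k : Int))]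
    simp only [pvA_dloop, pvB_dloop]
    rw [pvA_rows_eq grid i j d0 (by omega), pvA_cols_eq grid i j d0 (by omega)]
    rw [pvRS_step grid i j d0 hd0, pvCS_step grid i j d0 hd0]
    have hdiagA : (PySem.List.pyRange 0 d0 1).foldl
          (fun acc x => acc + pvCell grid (i + x) (j + x)) 0 = pvDiagSum grid i j d0 := by
      rw [PySem.List.foldl_add]; simp [pvDiagSum]
    have hdiagB : pvDiagSum grid i j (d0 - 1)
          + PySem.List.pyGetD (PySem.List.pyGetD grid (i + (d0 - 1)) []) (j + (d0 - 1)) 0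
        = pvDiagSum grid i j d0 := by
      have := pvDiagSum_succ grid i j (d0 - 1) (by omega)
      rw [show d0 - 1 + 1 = d0 by ring] at this
      rw [this]; rfl
    rw [hdiagA, hdiagB]
    have h2 := ih (d0 + 1) (max ans d0) (by omega)
    rw [show d0 + 1 - 1 = d0 by ring] at h2
    split_ifs <;> first | rfl | exact h2

-- per-cell: starting from the empty state, the d-loops agree
lemma pv_percell (grid : List (List Int)) (i j ans lim : Int) :
    pvA_dloop grid i j (PySem.List.pyRange 1 lim 1) ans
      = pvB_dloop grid i j (PySem.List.pyRange 1 lim 1) ([], [], 0) ans := by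
  have hsh : PySem.List.pyRange 1 lim 1 = PySem.List.pyRange 1 (1 + (((lim - 1).toNat : Nat) : Int)) 1 := by
    by_cases h : lim ≤ 1
    · have h0 : (lim - 1).toNat = 0 := by omega
      rw [h0, PySem.List.pyRange_one_eq_nil h, PySem.List.pyRange_one_eq_nil (by norm_num)]
    · congr 1
      omega
  rw [hsh]
  have h := pv_dloop_eq grid i j ((lim - 1).toNat) 1 ans le_rfl
  rw [show (1:Int) - 1 = 0 by ring, pvRS_zero, pvCS_zero, pvDiagSum_zero] at h
  exact h

lemma pv_main_eq (grid : List (List Int)) :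
    largestMagicSquare_fails grid = largestMagicSquare_fails_alt grid := by
  simp only [largestMagicSquare_fails, largestMagicSquare_fails_alt]
  exact List.foldl_ext _ _ 1 (fun ans i _ =>
    List.foldl_ext _ _ ans (fun ans' j _ => pv_percell grid i j ans' _))

-- ===== VERDICT (by name: the statement is the Claim_ definition above) =====
theorem largestMagicSquare_fails_spec : Claim_equal_largestMagicSquare_fails := by
  intro grid _ _
  unfold Spec_largestMagicSquare_fails
  exact pv_main_eq grid
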